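-- pv_equiv track=rewrite | github.com/pat-em/codewars | emotional_sort.py | sort_emotions
-- ===== SOURCE A (Python) =====
-- def sort_emotions(arr, order):
--     emotion_value = {':D': 1, ':)': 2, ':|': 3, ':(': 4, 'T_T': 5}
--     occ_emotions = []
--     value_emotion = []
--
--     for i in range(len(arr)):
--         if arr[i] in emotion_value.keys():
--             occ_emotions.append(arr[i])
--             value_emotion.append(emotion_value[arr[i]])
--     d = zip(occ_emotions, value_emotion)
--     d = sorted(list(d), key = lambda x: x[1])
--
--     result = []
--     for x in d:
--         result.append(x[0])
--
--     return result if order else list(reversed(result))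
-- ===== SOURCE B (Python) =====
-- def sort_emotions(arr, order):
--     emotions = [':D', ':)', ':|', ':(', 'T_T']
--     if not order:
--         emotions.reverse()
--     return [e for e in emotions for _ in range(arr.count(e))]
-- ===== Notes on version B (the rewrite author's own statement) =====
-- stated objective: simpler
-- what changed: Replaces filter+zip+comparison-sort+unzip with a counting (bucket) pass: for each of the five fixed emotions, in value order (reversed if order is falsy), emit it arr.count(e) times.
import Mathlib
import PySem

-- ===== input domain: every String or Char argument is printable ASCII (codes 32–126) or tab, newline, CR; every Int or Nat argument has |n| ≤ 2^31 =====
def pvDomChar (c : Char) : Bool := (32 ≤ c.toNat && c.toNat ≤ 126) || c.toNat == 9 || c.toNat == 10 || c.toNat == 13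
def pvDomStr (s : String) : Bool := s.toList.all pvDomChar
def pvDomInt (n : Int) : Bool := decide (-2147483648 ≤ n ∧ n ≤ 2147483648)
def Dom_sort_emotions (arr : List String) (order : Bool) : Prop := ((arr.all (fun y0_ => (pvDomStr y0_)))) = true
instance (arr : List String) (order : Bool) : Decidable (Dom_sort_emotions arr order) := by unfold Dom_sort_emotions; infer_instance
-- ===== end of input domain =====

-- B replaces A's filter + zip + comparison sort + unzip by a counting pass over the five
-- fixed emotions in value order (reversed when order is falsy); objective: simpler.

-- ===== PORT A =====
-- the dict literal {':D': 1, ':)': 2, ':|': 3, ':(': 4, 'T_T': 5}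
def pvDict : PySem.Dict String Int :=
  ((((PySem.Dict.empty.insert ":D" 1).insert ":)" 2).insert ":|" 3).insert ":(" 4).insert "T_T" 5

-- body of A's first loop: append arr[i] and its value when arr[i] is in the dict's keys
def pvF (st : List String × List Int) (x : String) : List String × List Int :=
  if pvDict.keys.contains x then (st.1 ++ [x], st.2 ++ [pvDict.getD x 0]) else st

def sort_emotions (arr : List String) (order : Bool) : List String :=
  let st := (PySem.List.pyRange 0 (PySem.List.len arr) 1).foldl
      (fun st i => pvF st (PySem.List.pyGetD arr i "")) ([], [])
  let d := st.1.zip st.2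
  let d := PySem.List.sorted d (fun x => x.2) false
  let result := d.foldl (fun acc x => acc ++ [x.1]) []
  if order then result else result.reverse

-- ===== PORT B =====
def sort_emotions_alt (arr : List String) (order : Bool) : List String :=
  let emotions := [":D", ":)", ":|", ":(", "T_T"]
  let emotions := if order then emotions else emotions.reverse
  emotions.flatMap (fun e => List.replicate (PySem.List.count arr e) e)

-- ===== PRECONDITION & SPEC =====
def Spec_sort_emotions (arr : List String) (order : Bool) (out : List String) : Prop := out = sort_emotions_alt arr order
instance (arr : List String) (order : Bool) (out : List String) : Decidable (Spec_sort_emotions arr order out) := by unfold Spec_sort_emotions; infer_instance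

-- ===== CLAIM (what is proved, stated in full; the proofs are below) =====
def Claim_equal_sort_emotions : Prop := ∀ (arr : List String) (order : Bool), Dom_sort_emotions arr order → Spec_sort_emotions arr order (sort_emotions arr order)

-- ===== LEMMAS AND PROOFS =====

def pvE : List String := [":D", ":)", ":|", ":(", "T_T"]
def pvPair (x : String) : String × Int := (x, pvDict.getD x 0)
def pvBucket (l : List String) : List (String × Int) :=
  pvE.flatMap (fun e => List.replicate (List.count e l) (pvPair e))

-- A's two parallel appends, zipped, are the filtered list paired with its values
lemma pv_zipfold : ∀ (l : List String) (o : List String) (v : List Int), o.length = v.length →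
    ((l.foldl pvF (o, v)).1).zip ((l.foldl pvF (o, v)).2)
      = o.zip v ++ (l.filter (fun x => pvDict.keys.contains x)).map pvPair := by
  intro l
  induction l with
  | nil => intro o v h; simp
  | cons x t ih =>
    intro o v h
    simp only [List.foldl_cons, List.filter_cons, pvF]
    by_cases hx : pvDict.keys.contains x
    · simp only [hx, if_pos]
      rw [ih (o ++ [x]) (v ++ [pvDict.getD x 0]) (by simp [h]),
          List.zip_append h]
      simp [pvPair]
    · simp only [hx, if_neg, Bool.false_eq_true, not_false_iff]
      rw [ih o v h]

lemma pv_flatMap_congr {α β : Type} (E : List α) (g h : α → List β)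
    (hg : ∀ a ∈ E, g a = h a) : E.flatMap g = E.flatMap h := by
  induction E with
  | nil => rfl
  | cons e E ih => simp [List.flatMap_cons, hg e (by simp), ih (fun a ha => hg a (by simp [ha]))]

-- prepending one occurrence of x ∈ E permutes the bucket concatenation by one cons
lemma pv_flatMap_cons {α β : Type} [DecidableEq α] (f : α → β) :
    ∀ (E : List α), E.Nodup → ∀ x ∈ E, ∀ (l : List α),
    (E.flatMap fun e => List.replicate (List.count e (x :: l)) (f e)).Perm
      (f x :: E.flatMap fun e => List.replicate (List.count e l) (f e)) := by
  intro E
  induction E with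
  | nil => intro _ x hx; simp at hx
  | cons e E ih =>
    intro hnd x hx l
    rcases List.nodup_cons.mp hnd with ⟨he, hndE⟩
    simp only [List.flatMap_cons]
    rcases List.mem_cons.mp hx with rfl | hxE
    · rw [List.count_cons_self, List.replicate_succ]
      rw [pv_flatMap_congr E _ (fun e' => List.replicate (List.count e' l) (f e'))
        (fun a ha => by rw [List.count_cons_of_ne (fun hh : x = a => he (hh ▸ ha))])]
      simp
    · have hne : x ≠ e := fun hh => he (hh ▸ hxE)
      rw [List.count_cons_of_ne hne]
      exact ((ih hndE x hxE l).append_left _).trans List.perm_middle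

lemma pv_perm : ∀ (l : List String), (∀ x ∈ l, x ∈ pvE) →
    (l.map pvPair).Perm (pvBucket l) := by
  intro l
  induction l with
  | nil => intro _; simp [pvBucket, pvE]
  | cons x t ih =>
    intro hl
    refine (List.Perm.cons (pvPair x) (ih (fun y hy => hl y (by simp [hy])))).trans ?_
    exact (pv_flatMap_cons pvPair pvE (by decide) x (hl x (by simp)) t).symm

lemma pv_bucket_pairwise (l : List String) :
    List.Pairwise (fun a b => a.2 ≤ b.2) (pvBucket l) := by
  simp only [pvBucket, pvE, List.flatMap_cons, List.flatMap_nil, List.append_nil]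
  have h1 : pvPair ":D" = (":D", 1) := rfl
  have h2 : pvPair ":)" = (":)", 2) := rfl
  have h3 : pvPair ":|" = (":|", 3) := rfl
  have h4 : pvPair ":(" = (":(", 4) := rfl
  have h5 : pvPair "T_T" = ("T_T", 5) := rfl
  rw [h1, h2, h3, h4, h5]
  simp only [List.pairwise_append, List.pairwise_replicate, List.mem_replicate, List.mem_append]
  constructor
  · omega
  constructor
  · constructor
    · omega
    constructor
    · constructor
      · omega
      constructor
      · constructor
        · omega
        · constructor
          · omega
          · rintro a ⟨_, rfl⟩ b ⟨_, rfl⟩; omega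
      · rintro a ⟨_, rfl⟩ b h
        rcases h with ⟨_, rfl⟩ | ⟨_, rfl⟩ <;> omega
    · rintro a ⟨_, rfl⟩ b h
      rcases h with ⟨_, rfl⟩ | ⟨_, rfl⟩ | ⟨_, rfl⟩ <;> omega
  · rintro a ⟨_, rfl⟩ b h
    rcases h with ⟨_, rfl⟩ | ⟨_, rfl⟩ | ⟨_, rfl⟩ | ⟨_, rfl⟩ <;> omega

-- a key-ordered rearrangement is unique when equal keys force equal elements
lemma pv_stable_uniq : ∀ (l₁ l₂ : List (String × Int)), l₁.Perm l₂ →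
    List.Pairwise (fun a b => a.2 ≤ b.2) l₁ → List.Pairwise (fun a b => a.2 ≤ b.2) l₂ →
    (∀ a ∈ l₁, ∀ b ∈ l₁, a.2 = b.2 → a = b) → l₁ = l₂ := by
  intro l₁
  induction l₁ with
  | nil => intro l₂ hp _ _ _; exact (hp.symm.eq_nil).symm
  | cons a t ih =>
    intro l₂ hp h1 h2 hinj
    cases l₂ with
    | nil => exact absurd hp.eq_nil (by simp)
    | cons b t₂ =>
      have hab : a = b := by
        have hbm : b ∈ a :: t := hp.symm.subset (by simp)
        have ham : a ∈ b :: t₂ := hp.subset (by simp)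
        rcases List.mem_cons.mp hbm with rfl | hbt
        · rfl
        · rcases List.mem_cons.mp ham with rfl | hat
          · rfl
          · have h1' := (List.pairwise_cons.mp h1).1 b hbt
            have h2' := (List.pairwise_cons.mp h2).1 a hat
            exact hinj a (by simp) b (by simp [hbt]) (le_antisymm h1' h2')
      subst hab
      rw [ih t₂ hp.cons_inv (List.pairwise_cons.mp h1).2 (List.pairwise_cons.mp h2).2
        (fun p hp' q hq' => hinj p (by simp [hp']) q (by simp [hq']))]

-- the stable sort of the paired filtered list IS the bucket concatenation
lemma pv_sorted_eq_bucket (l : List String) (hl : ∀ x ∈ l, x ∈ pvE) :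
    PySem.List.sorted (l.map pvPair) (fun x => x.2) false = pvBucket l := by
  apply pv_stable_uniq
  · exact (PySem.List.sorted_perm _ _ _).trans (pv_perm l hl)
  · exact PySem.List.sorted_pairwise _ _
  · exact pv_bucket_pairwise l
  · intro a ha b hb
    rw [PySem.List.mem_sorted] at ha hb
    rcases List.mem_map.mp ha with ⟨x, hx, rfl⟩
    rcases List.mem_map.mp hb with ⟨y, hy, rfl⟩
    have hx' := hl x hx; have hy' := hl y hy
    revert hx' hy'
    have : ∀ x ∈ pvE, ∀ y ∈ pvE, (pvPair x).2 = (pvPair y).2 → pvPair x = pvPair y := by decide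
    exact fun hx' hy' => this x hx' y hy'

lemma pv_main (arr : List String) (order : Bool) :
    sort_emotions arr order = sort_emotions_alt arr order := by
  have hfilt : ∀ x ∈ arr.filter (fun x => pvDict.keys.contains x), x ∈ pvE := by
    intro x hx
    have h := (List.mem_filter.mp hx).2
    have hk : x ∈ pvDict.keys := by simpa using h
    exact (show pvDict.keys = pvE from rfl) ▸ hk
  have hcount : pvE.flatMap (fun e =>
        List.replicate (List.count e (arr.filter (fun x => pvDict.keys.contains x))) e)
      = pvE.flatMap (fun e => List.replicate (PySem.List.count arr e) e) := by
    apply pv_flatMap_congr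
    intro e he
    simp only [pvE, List.mem_cons, List.not_mem_nil, or_false] at he
    rcases he with rfl | rfl | rfl | rfl | rfl <;>
      rw [PySem.List.count_eq, List.count_filter (by decide)]
  simp only [sort_emotions, sort_emotions_alt]
  rw [PySem.List.foldl_pyRange_zero_pyGetD arr "" pvF ([], [])]
  rw [pv_zipfold arr [] [] rfl,
    show ∀ X : List (String × Int), (([] : List String).zip ([] : List Int)) ++ X = X from fun _ => rfl]
  rw [pv_sorted_eq_bucket _ hfilt]
  simp only [PySem.List.foldl_append_singleton_eq_map]
  have hmap : (pvBucket (arr.filter (fun x => pvDict.keys.contains x))).map (fun x => x.1)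
      = pvE.flatMap (fun e => List.replicate (PySem.List.count arr e) e) := by
    rw [← hcount]
    simp [pvBucket, List.map_flatMap, pvPair]
  rw [List.nil_append, hmap]
  cases order with
  | true => simp [pvE]
  | false =>
    simp only [if_neg, Bool.false_eq_true, not_false_iff]
    rw [List.reverse_flatMap]
    show _ = List.flatMap _ pvE.reverse
    apply pv_flatMap_congr
    intro e _
    simp [Function.comp, List.reverse_replicate]

-- ===== VERDICT (by name: the statement is the Claim_ definition above) =====
theorem sort_emotions_spec : Claim_equal_sort_emotions := by
  intro arr order _
  unfold Spec_sort_emotions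
  exact pv_main arr order
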